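-- pv_equiv track=rewrite | github.com/masar-juraj/barracuda | lbadc.py | api_uri_slash
-- ===== SOURCE A (Python) =====
-- def api_uri_slash(uri: str):
--     result = ""
--     if not uri:
--         return result
--     slash_appended = False
--     for char in uri:
--         if char == "/":
--             if not slash_appended:
--                 result = result + char
--                 slash_appended = True
--         else:
--             result = result + char
--             slash_appended = False
--     return result
-- ===== SOURCE B (Python) =====
-- def api_uri_slash(uri: str):
--     if not uri:
--         return ""
--     segs = [p for p in uri.split("/") if p]
--     out = "/".join(segs)
--     if uri.startswith("/"):
--         out = "/" + out
--     if uri.endswith("/") and segs: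
--         out = out + "/"
--     return out
-- ===== Notes on version B (the rewrite author's own statement) =====
-- stated objective: alternative
-- what changed: Replaces A's single character loop with a slash-seen flag by three staged passes: split the string on the slash separator, discard the empty segments, rejoin with the separator and restore a leading/trailing slash from the original ends.
import Mathlib
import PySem

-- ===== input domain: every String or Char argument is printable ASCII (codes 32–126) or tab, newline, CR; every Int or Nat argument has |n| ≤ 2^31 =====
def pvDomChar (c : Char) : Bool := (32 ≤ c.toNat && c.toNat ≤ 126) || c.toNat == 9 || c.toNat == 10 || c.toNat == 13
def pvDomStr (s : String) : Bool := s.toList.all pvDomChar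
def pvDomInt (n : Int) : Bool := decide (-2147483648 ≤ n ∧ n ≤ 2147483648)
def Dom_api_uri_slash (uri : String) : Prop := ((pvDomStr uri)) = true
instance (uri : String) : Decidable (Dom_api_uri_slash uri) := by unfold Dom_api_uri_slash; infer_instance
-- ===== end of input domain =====

-- B collapses slash runs by split / drop-empties / rejoin instead of A's flag loop; return values proved equal on all of Dom.

-- ===== PORT A =====
-- A: loop over characters keeping (result, slash_appended); result kept as List Char, String.ofList at the end.
def api_uri_slash (uri : String) : String :=
  if uri = "" then "" else
  let st := uri.toList.foldl
    (fun (st : List Char × Bool) c =>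
      if c = '/' then
        (if st.2 then st else (st.1 ++ [c], true))
      else
        (st.1 ++ [c], false))
    ([], false)
  String.ofList st.1

-- ===== PORT B =====
-- B: split on '/', keep the non-empty segments, rejoin with '/', restore leading/trailing slash.
def api_uri_slash_alt (uri : String) : String :=
  if uri = "" then "" else
  let cs := uri.toList
  let segs := (PySem.Chars.splitOn cs ['/']).filter (fun p => p ≠ [])
  let out0 := PySem.Chars.join ['/'] segs
  let out1 := if PySem.Chars.startswith cs ['/'] then '/' :: out0 else out0
  let out2 := if PySem.Chars.endswith cs ['/'] = true ∧ segs ≠ [] then out1 ++ ['/'] else out1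
  String.ofList out2

-- ===== PRECONDITION & SPEC =====
def Spec_api_uri_slash (uri : String) (out : String) : Prop := out = api_uri_slash_alt uri
instance (uri : String) (out : String) : Decidable (Spec_api_uri_slash uri out) := by unfold Spec_api_uri_slash; infer_instance

-- ===== CLAIM (what is proved, stated in full; the proofs are below) =====
def Claim_equal_api_uri_slash : Prop := ∀ (uri : String), Dom_api_uri_slash uri → Spec_api_uri_slash uri (api_uri_slash uri)

-- ===== LEMMAS AND PROOFS =====

-- A's loop, as a pure recursive collapse with the slash-seen flag.
def pvColl : Bool → List Char → List Char
  | _, [] => []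
  | p, c :: t => if c = '/' then (if p then pvColl true t else '/' :: pvColl true t) else c :: pvColl false t

-- A's fold equals pvColl.
theorem pv_fold_eq_coll (cs : List Char) : ∀ (acc : List Char) (p : Bool),
    (cs.foldl
      (fun (st : List Char × Bool) c =>
        if c = '/' then
          (if st.2 then st else (st.1 ++ [c], true))
        else
          (st.1 ++ [c], false))
      (acc, p)).1 = acc ++ pvColl p cs := by
  induction cs with
  | nil => intro acc p; simp [pvColl]
  | cons c t ih =>
    intro acc p
    by_cases hc : c = '/'
    · cases p
      · simpa [List.foldl, hc, pvColl] using ih (acc ++ ['/']) true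
      · simpa [List.foldl, hc, pvColl] using ih acc true
    · simpa [List.foldl, hc, pvColl] using ih (acc ++ [c]) false

-- structural split on '/'
def pvS : List Char → List (List Char)
  | [] => [[]]
  | c :: t => if c = '/' then [] :: pvS t else (c :: (pvS t).headI) :: (pvS t).tail

theorem pvS_ne_nil (cs : List Char) : pvS cs ≠ [] := by
  cases cs with
  | nil => simp [pvS]
  | cons c t => by_cases h : c = '/' <;> simp [pvS, h]

theorem pvS_cons_eq (cs : List Char) : pvS cs = (pvS cs).headI :: (pvS cs).tail := by
  cases h : pvS cs with
  | nil => exact absurd h (pvS_ne_nil cs)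
  | cons a l => simp

-- splitOn.go on sep ['/']: the two step equations, then the characterisation by pvS.
theorem pv_go_step_slash (fuel : Nat) (t cur : List Char) (acc : List (List Char)) :
    PySem.Chars.splitOn.go ['/'] (fuel+1) ('/' :: t) cur acc
      = PySem.Chars.splitOn.go ['/'] fuel t [] (cur.reverse :: acc) := by
  rw [PySem.Chars.splitOn.go.eq_def]
  simp [List.isPrefixOf]

theorem pv_go_step_char (fuel : Nat) (c : Char) (t cur : List Char) (acc : List (List Char))
    (hc : ¬ c = '/') :
    PySem.Chars.splitOn.go ['/'] (fuel+1) (c :: t) cur acc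
      = PySem.Chars.splitOn.go ['/'] fuel t (c :: cur) acc := by
  rw [PySem.Chars.splitOn.go.eq_def]
  simp [List.isPrefixOf, Ne.symm hc]

theorem pv_go_eq (cs : List Char) : ∀ (fuel : Nat) (cur : List Char) (acc : List (List Char)),
    cs.length ≤ fuel →
    PySem.Chars.splitOn.go ['/'] fuel cs cur acc
      = acc.reverse ++ ((cur.reverse ++ (pvS cs).headI) :: (pvS cs).tail) := by
  induction cs with
  | nil =>
    intro fuel cur acc _
    cases fuel <;> simp [PySem.Chars.splitOn.go, pvS]
  | cons c t ih =>
    intro fuel cur acc h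
    cases fuel with
    | zero => simp at h
    | succ fuel =>
      by_cases hc : c = '/'
      · subst hc
        rw [pv_go_step_slash, ih fuel [] (cur.reverse :: acc) (by simpa using h)]
        rw [show pvS ('/' :: t) = [] :: pvS t from by simp [pvS]]
        simp
        rw [← pvS_cons_eq t]
      · rw [pv_go_step_char fuel c t cur acc hc, ih fuel (c :: cur) acc (by simpa using h)]
        rw [pvS, if_neg hc]
        simp

theorem pv_splitOn_eq (cs : List Char) : PySem.Chars.splitOn cs ['/'] = pvS cs := by
  have := pv_go_eq cs (cs.length + 1) [] [] (by omega)
  simpa [PySem.Chars.splitOn, ← pvS_cons_eq cs] using this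

-- non-empty segments are all empty iff the string is all slashes
theorem pv_filter_nil_iff (t : List Char) :
    (pvS t).filter (fun p => p ≠ []) = [] ↔ ∀ x ∈ t, x = '/' := by
  induction t with
  | nil => simp [pvS]
  | cons c t ih =>
    by_cases hc : c = '/'
    · rw [pvS, if_pos hc, List.filter_cons]
      simp only [List.filter_eq_nil_iff, decide_not, Bool.not_eq_eq_eq_not, Bool.not_true,
        decide_eq_false_iff_not, not_not] at ih
      simp [hc, ih]
    · rw [pvS, if_neg hc, List.filter_cons]
      simp [hc]

-- getLast? of an all-slash nonempty list
theorem pv_getLast_all_slash (t : List Char) (h : ∀ x ∈ t, x = '/') (hne : t ≠ []) :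
    t.getLast? = some '/' := by
  cases hl : t.getLast? with
  | none => simp [List.getLast?_eq_none_iff] at hl; exact absurd hl hne
  | some a =>
    have ha : a ∈ t := List.mem_of_getLast? hl
    rw [h a ha]

-- helper names for B's core
def pvCore (cs : List Char) : List Char :=
  if cs.getLast? = some '/' ∧ (pvS cs).filter (fun p => p ≠ []) ≠ [] then
    (if cs.head? = some '/' then
        '/' :: PySem.Chars.join ['/'] ((pvS cs).filter (fun p => p ≠ []))
      else PySem.Chars.join ['/'] ((pvS cs).filter (fun p => p ≠ []))) ++ ['/']
  else
    (if cs.head? = some '/' then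
        '/' :: PySem.Chars.join ['/'] ((pvS cs).filter (fun p => p ≠ []))
      else PySem.Chars.join ['/'] ((pvS cs).filter (fun p => p ≠ [])))

theorem pvS_slash (t : List Char) : pvS ('/' :: t) = [] :: pvS t := by
  simp [pvS]

theorem pvS_char (c : Char) (t : List Char) (hc : ¬ c = '/') :
    pvS (c :: t) = (c :: (pvS t).headI) :: (pvS t).tail := by
  simp [pvS, hc]

theorem pv_join_cons (c : Char) (xs : List Char) (L : List (List Char)) :
    PySem.Chars.join ['/'] ((c :: xs) :: L) = c :: PySem.Chars.join ['/'] (xs :: L) := by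
  cases L with
  | nil => simp [PySem.Chars.join_singleton]
  | cons b l => simp [PySem.Chars.join_cons_cons]

-- key lemma: A's collapse equals B's split/filter/join reconstruction
theorem pv_key : ∀ cs : List Char, pvColl false cs = pvCore cs
  | [] => by
    simp [pvColl, pvCore, pvS]
  | [c] => by
    by_cases hc : c = '/'
    · subst hc
      simp [pvColl, pvCore, pvS]
    · simp [pvColl, pvCore, pvS, hc]
  | c :: d :: t => by
    have ih := pv_key (d :: t)
    by_cases hc : c = '/' <;> by_cases hd : d = '/'
    · -- c = '/', d = '/': both sides unchanged from ('/' :: t)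
      subst hc; subst hd
      have ihs := pv_key ('/' :: t)
      rw [show pvColl false ('/' :: '/' :: t) = pvColl false ('/' :: t) from by
        simp [pvColl]]
      rw [ihs]
      unfold pvCore
      rw [pvS_slash, pvS_slash, pvS_slash]
      simp
    · -- c = '/', d ≠ '/': a leading slash is kept
      subst hc
      rw [show pvColl false ('/' :: d :: t) = '/' :: pvColl false (d :: t) from by
        simp [pvColl, hd]]
      rw [ih]
      unfold pvCore
      rw [pvS_slash, pvS_char d t hd]
      simp only [List.headI, List.tail]
      simp [hd]
      split_ifs <;> rfl
    · -- c ≠ '/', d = '/'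
      subst hd
      rw [show pvColl false (c :: '/' :: t) = c :: pvColl false ('/' :: t) from by
        simp [pvColl, hc]]
      rw [ih]
      unfold pvCore
      rw [pvS_char c ('/' :: t) hc, pvS_slash]
      simp only [List.headI, List.tail]
      rcases hF : (pvS t).filter (fun p => p ≠ []) with _ | ⟨p, F⟩
      · -- t is all slashes
        have hall : ∀ x ∈ t, x = '/' := (pv_filter_nil_iff t).mp hF
        have hlast : ('/' :: t).getLast? = some '/' :=
          pv_getLast_all_slash ('/' :: t) (by simpa using hall) (by simp)
        simp only [ne_eq, decide_not] at hF
        simp [hF, hlast, hc, PySem.Chars.join_singleton, PySem.Chars.join_nil]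
      · simp only [ne_eq, decide_not] at hF
        simp only [List.getLast?_cons_cons]
        simp [hF]
        split_ifs <;>
          simp [PySem.Chars.join_cons_cons]
    · -- c ≠ '/', d ≠ '/'
      rw [show pvColl false (c :: d :: t) = c :: pvColl false (d :: t) from by
        simp [pvColl, hc]]
      rw [ih]
      unfold pvCore
      rw [pvS_char c (d :: t) hc, pvS_char d t hd]
      obtain ⟨h0, tl0, hS⟩ : ∃ h0 tl0, pvS t = h0 :: tl0 := by
        cases hS : pvS t with
        | nil => exact absurd hS (pvS_ne_nil t)
        | cons a l => exact ⟨a, l, rfl⟩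
      rw [hS]
      simp only [List.headI, List.tail, List.getLast?_cons_cons]
      simp [hc, hd]
      split_ifs <;> simp [pv_join_cons]

-- bridges from PySem startswith/endswith to head?/getLast?
theorem pv_start_iff (cs : List Char) :
    PySem.Chars.startswith cs ['/'] = true ↔ cs.head? = some '/' := by
  rw [PySem.Chars.startswith_iff]
  cases cs <;> simp [List.cons_prefix_iff, eq_comm]

theorem pv_end_iff (cs : List Char) :
    PySem.Chars.endswith cs ['/'] = true ↔ cs.getLast? = some '/' := by
  rw [PySem.Chars.endswith_iff]
  constructor
  · rintro ⟨s, rfl⟩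
    simp
  · intro h
    rcases List.eq_nil_or_concat cs with rfl | ⟨s, a, rfl⟩
    · simp at h
    · simp at h
      exact ⟨s, by simp [h]⟩

-- ===== VERDICT (by name: the statement is the Claim_ definition above) =====
theorem api_uri_slash_spec : Claim_equal_api_uri_slash := by
  intro uri _
  unfold Spec_api_uri_slash api_uri_slash api_uri_slash_alt
  by_cases h : uri = ""
  · simp [h]
  · simp only [h, if_false]
    rw [pv_fold_eq_coll uri.toList [] false, pv_splitOn_eq, pv_key]
    simp only [pvCore, pv_start_iff, pv_end_iff, List.nil_append]
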